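-- pv_equiv track=rewrite | github.com/jordanaron22/Weighted-Voting-Comps-Winter-Spring-2018 | Ambiguities.py | create_perms
-- ===== SOURCE A (Python) =====
-- import itertools
--
-- def create_perms(size):
--     lst = list(itertools.product([0, 1], repeat=size))
--     set_of_coalitions = []
--
--     for item in lst:
--         coalition = ""
--
--         for index in range(size):
--             value = item[index] * (65 + index)
--             if item[index] != 0:
--                 coalition = coalition + chr(value)
--         set_of_coalitions.append(coalition)
--
--     return set_of_coalitions
-- ===== SOURCE B (Python) =====
-- def create_perms(size):
--     if size < 0:
--         raise ValueError("repeat argument cannot be negative")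
--     coalitions = [""]
--     for i in range(size):
--         c = chr(65 + i)
--         coalitions = [p + t for p in coalitions for t in ("", c)]
--     return coalitions
-- ===== Notes on version B (the rewrite author's own statement) =====
-- stated objective: simpler
-- what changed: Replaces itertools.product enumeration plus a per-tuple index loop with a doubling loop over the letters: each pass maps every partial coalition p to p and p+chr(65+i), so no bit tuples are ever materialised; negative size keeps raising ValueError.
import Mathlib
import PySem

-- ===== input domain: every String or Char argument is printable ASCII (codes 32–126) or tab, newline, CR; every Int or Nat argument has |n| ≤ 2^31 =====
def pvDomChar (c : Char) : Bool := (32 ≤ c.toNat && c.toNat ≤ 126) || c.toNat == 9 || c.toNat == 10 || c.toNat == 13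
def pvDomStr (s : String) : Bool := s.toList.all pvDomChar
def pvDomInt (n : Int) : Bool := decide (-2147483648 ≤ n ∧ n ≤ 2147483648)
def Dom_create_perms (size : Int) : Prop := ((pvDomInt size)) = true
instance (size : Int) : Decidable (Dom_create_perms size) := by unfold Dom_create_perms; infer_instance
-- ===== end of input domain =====

-- B simplifies A: instead of materialising all 0/1 tuples with itertools.product and
-- re-scanning each by index, it builds the coalition strings directly by a doubling loop over the letters.

-- ===== PORT A =====
-- itertools.product([0, 1], repeat=n): leftmost coordinate varies slowest
def prodRep01 : Nat → List (List Int)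
  | 0 => [[]]
  | n + 1 => ([0, 1] : List Int).flatMap (fun b => (prodRep01 n).map (fun t => b :: t))

def create_perms (size : Int) : List String :=
  -- size.toNat is exact on Pre_ (0 ≤ size); for size < 0 Python raises ValueError (outside Pre_)
  let lst := prodRep01 size.toNat
  lst.foldl (fun set_of_coalitions item =>
    let coalition :=
      (PySem.List.pyRange 0 size 1).foldl (fun coalition index =>
        -- item[index]: index ∈ range(size) is always in range, so pyGetD with a dummy default is exact
        let value := (PySem.List.pyGetD item index 0) * (65 + index)
        if PySem.List.pyGetD item index 0 ≠ 0 then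
          coalition ++ String.mk [Char.ofNat value.toNat]
        else coalition) ""
    set_of_coalitions ++ [coalition]) []

-- ===== PORT B =====
def create_perms_alt (size : Int) : List String :=
  -- size < 0 raises ValueError in Source B (outside Pre_); the guard yields no value to port
  (PySem.List.pyRange 0 size 1).foldl (fun coalitions i =>
    -- i ∈ range(size) is nonnegative, so chr(65+i) is Char.ofNat (65+i).toNat exactly
    let c := Char.ofNat (65 + i).toNat
    coalitions.flatMap (fun p => [p, p ++ String.mk [c]])) [""]

-- ===== PRECONDITION & SPEC =====
-- Pre_ excludes size < 0, where both Pythons raise ValueError.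
def Pre_create_perms (size : Int) : Prop := 0 ≤ size
instance (size : Int) : Decidable (Pre_create_perms size) := by unfold Pre_create_perms; infer_instance
def pvWitness_create_perms : Int := (2)

def Spec_create_perms (size : Int) (out : List String) : Prop := out = create_perms_alt size
instance (size : Int) (out : List String) : Decidable (Spec_create_perms size out) := by unfold Spec_create_perms; infer_instance

-- ===== CLAIM (what is proved, stated in full; the proofs are below) =====
def Claim_equal_create_perms : Prop := ∀ (size : Int), Dom_create_perms size → Pre_create_perms size → Spec_create_perms size (create_perms size)

-- ===== LEMMAS AND PROOFS =====

-- the coalition A's inner index loop builds from the 0/1 tuple `item`, letters starting at k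
def render (k : Nat) : List Int → String
  | [] => ""
  | b :: t => (if b ≠ 0 then String.mk [Char.ofNat (65 + k)] else "") ++ render (k + 1) t

lemma render_append (ys : List Int) (b : Int) (k : Nat) :
    render k (ys ++ [b]) =
      render k ys ++ (if b ≠ 0 then String.mk [Char.ofNat (65 + (k + ys.length))] else "") := by
  induction ys generalizing k with
  | nil => simp [render]
  | cons y t ih =>
    simp only [List.cons_append, render, ih, List.length_cons, String.append_assoc]
    ring_nf

lemma prodRep01_mem_01 (n : Nat) : ∀ t ∈ prodRep01 n, ∀ x ∈ t, x = 0 ∨ x = 1 := by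
  induction n with
  | zero => simp [prodRep01]
  | succ n ih =>
    intro t ht x hx
    simp only [prodRep01, List.mem_flatMap, List.mem_map] at ht
    obtain ⟨b, hb, u, hu, rfl⟩ := ht
    rcases List.mem_cons.mp hx with rfl | hx
    · simpa using hb
    · exact ih u hu x hx

lemma prodRep01_length (n : Nat) : ∀ t ∈ prodRep01 n, t.length = n := by
  induction n with
  | zero => simp [prodRep01]
  | succ n ih =>
    intro t ht
    simp only [prodRep01, List.mem_flatMap, List.mem_map] at ht
    obtain ⟨b, _, u, hu, rfl⟩ := ht
    simp [ih u hu]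

-- the tuples of product([0,1], repeat=n+1) are also those of repeat=n, each extended by 0 then by 1
lemma prodRep01_snoc (n : Nat) :
    prodRep01 (n + 1) = (prodRep01 n).flatMap (fun t => [t ++ [0], t ++ [1]]) := by
  induction n with
  | zero => simp [prodRep01]
  | succ n ih =>
    rw [show n + 1 + 1 = (n + 1) + 1 from rfl]
    conv_lhs => rw [prodRep01, ih]
    conv_rhs => rw [prodRep01]
    simp [List.flatMap_def, List.map_map, Function.comp_def]

-- A's inner loop over range(len item) computes `render 0 item` (for 0/1 tuples)
lemma innerA (item : List Int) (h01 : ∀ x ∈ item, x = 0 ∨ x = 1) (a : String) :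
    (PySem.List.pyRange 0 (item.length : Int) 1).foldl (fun coalition index =>
        if PySem.List.pyGetD item index 0 ≠ 0 then
          coalition ++ String.mk [Char.ofNat ((PySem.List.pyGetD item index 0) * (65 + index)).toNat]
        else coalition) a = a ++ render 0 item := by
  induction item using List.reverseRecOn generalizing a with
  | nil => simp [PySem.List.pyRange_one_eq_nil, render]
  | append_singleton ys b ih =>
    have hsplit : PySem.List.pyRange 0 ((ys ++ [b]).length : Int) 1 =
        PySem.List.pyRange 0 (ys.length : Int) 1 ++ [(ys.length : Int)] := by
      have := PySem.List.pyRange_one_succ_right (a := 0) (b := (ys.length : Int)) (by positivity)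
      simpa [List.length_append] using this
    rw [hsplit, List.foldl_append]
    have hpre : ∀ (j : Int), j ∈ PySem.List.pyRange 0 (ys.length : Int) 1 →
        PySem.List.pyGetD (ys ++ [b]) j 0 = PySem.List.pyGetD ys j 0 := by
      intro j hj
      rw [PySem.List.mem_pyRange_one] at hj
      obtain ⟨m, rfl⟩ : ∃ m : Nat, j = (m : Int) := ⟨j.toNat, by omega⟩
      have h2 : m < ys.length := by omega
      simp [List.getD, List.getElem?_append_left h2]
    have hfold : (PySem.List.pyRange 0 (ys.length : Int) 1).foldl (fun coalition index =>
        if PySem.List.pyGetD (ys ++ [b]) index 0 ≠ 0 then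
          coalition ++ String.mk [Char.ofNat ((PySem.List.pyGetD (ys ++ [b]) index 0) * (65 + index)).toNat]
        else coalition) a = a ++ render 0 ys := by
      rw [PySem.List.foldl_congr_mem (g := fun coalition index =>
        if PySem.List.pyGetD ys index 0 ≠ 0 then
          coalition ++ String.mk [Char.ofNat ((PySem.List.pyGetD ys index 0) * (65 + index)).toNat]
        else coalition)]
      · exact ih (fun x hx => h01 x (List.mem_append_left _ hx)) a
      · intro acc j hj; rw [hpre j hj]
    rw [hfold]
    have hlast : PySem.List.pyGetD (ys ++ [b]) (ys.length : Int) 0 = b := by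
      simp [List.getD]
    simp only [List.foldl_cons, List.foldl_nil, hlast, render_append]
    rcases h01 b (List.mem_append_right _ (List.mem_singleton.mpr rfl)) with rfl | rfl
    · simp
    · have h65 : ((65 : Int) + (ys.length : Int)).toNat = 65 + ys.length := by omega
      simp [String.append_assoc, h65]

-- B's doubling loop over range(n) builds exactly the rendered product tuples
lemma loopB (n : Nat) :
    (PySem.List.pyRange 0 (n : Int) 1).foldl (fun coalitions i =>
      coalitions.flatMap (fun p => [p, p ++ String.mk [Char.ofNat ((65 : Int) + i).toNat]]))
      [""] = (prodRep01 n).map (render 0) := by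
  induction n with
  | zero => simp [PySem.List.pyRange_one_eq_nil, prodRep01, render]
  | succ n ih =>
    have hsplit : PySem.List.pyRange 0 ((n + 1 : Nat) : Int) 1 =
        PySem.List.pyRange 0 (n : Int) 1 ++ [(n : Int)] := by
      have := PySem.List.pyRange_one_succ_right (a := 0) (b := (n : Int)) (by positivity)
      simpa [show ((n + 1 : Nat) : Int) = (n : Int) + 1 by push_cast; ring] using this
    rw [hsplit, List.foldl_append, ih, List.foldl_cons, List.foldl_nil, prodRep01_snoc]
    have h65 : ((65 : Int) + (n : Int)).toNat = 65 + n := by omega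
    rw [List.map_flatMap, List.flatMap_map]
    apply List.flatMap_congr
    intro t ht
    have hl : t.length = n := prodRep01_length n t ht
    simp [render_append, hl, h65]

lemma foldl_append_singleton {α β : Type} (f : α → β) (l : List α) (acc : List β) :
    l.foldl (fun s item => s ++ [f item]) acc = acc ++ l.map f := by
  induction l generalizing acc with
  | nil => simp
  | cons x t ih => simp [ih]

-- ===== VERDICT (by name: the statement is the Claim_ definition above) =====
theorem create_perms_spec : Claim_equal_create_perms := by
  intro size _ hpre
  unfold Spec_create_perms create_perms create_perms_alt
  have hsz : ((size.toNat : Int)) = size := Int.toNat_of_nonneg hpre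
  simp only []
  rw [foldl_append_singleton, ← hsz, loopB]
  apply List.map_congr_left
  intro item hitem
  have hl : item.length = size.toNat := prodRep01_length _ item hitem
  have := innerA item (prodRep01_mem_01 _ item hitem) ""
  rw [hl] at this
  simpa using this
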